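-- pv_equiv track=rewrite | github.com/IronMan61693/MultiprocessingPermutationPython | usingPermCalculator.py | parseEquationNums
-- ===== SOURCE A (Python) =====
-- def parseEquationNums(equationAsString):
-- 	operators = set('+-*/=')
-- 	ops_caught = []
-- 	nums_caught = []
-- 	buff_dude = []
--
-- 	# Begin analyzing the string one character at a time
-- 	for c in equationAsString:
-- 		# We have come across an operator
-- 		# This means everything in the buffer is either a variable or number
-- 		# We therefore want to join it together and put it in nums_caught
-- 		if c in operators:
-- 			nums_caught.append(''.join(buff_dude))
-- 			# Resets the buffer
-- 			buff_dude = []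
-- 			# Adds the operator to it's list in order
-- 			ops_caught.append(c)
--
-- 		# There is not yet an operator so add the character to the buffer
-- 		else:
-- 			buff_dude.append(c)
--
-- 	# We have gotten to the end
-- 	nums_caught.append(''.join(buff_dude))
--
-- 	# Returns the numbers/variables and the operators as two lists, which are in order,
-- 	# and if we alternate starting with nums caught we should be able to recreate the equation
-- 	return nums_caught
-- ===== SOURCE B (Python) =====
-- import re
--
-- def parseEquationNums(equationAsString):
-- 	return re.split(r'[-+*/=]', equationAsString)
-- ===== Notes on version B (the rewrite author's own statement) =====
-- stated objective: idiomatic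
-- what changed: Replaced the manual per-character loop with explicit buffer/accumulator lists by a single regex split on the operator character class.
import Mathlib
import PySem

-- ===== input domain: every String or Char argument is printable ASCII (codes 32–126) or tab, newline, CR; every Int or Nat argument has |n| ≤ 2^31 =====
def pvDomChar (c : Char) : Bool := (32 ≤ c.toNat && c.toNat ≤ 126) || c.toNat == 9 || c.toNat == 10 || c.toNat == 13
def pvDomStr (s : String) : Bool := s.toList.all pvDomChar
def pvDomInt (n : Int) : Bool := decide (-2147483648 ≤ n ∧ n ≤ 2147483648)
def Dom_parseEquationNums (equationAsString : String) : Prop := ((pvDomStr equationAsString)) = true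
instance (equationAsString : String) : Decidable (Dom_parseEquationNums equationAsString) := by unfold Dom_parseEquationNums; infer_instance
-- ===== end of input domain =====

-- B is the idiomatic regex split on the operator class; A is the manual buffer loop. Return values proved equal on all inputs.

-- ===== PORT A =====
-- operators = set('+-*/=') ; c in operators
def pvIsOp (c : Char) : Bool := c = '+' || c = '-' || c = '*' || c = '/' || c = '='

-- the for-loop over the characters, state = (nums_caught, buff_dude); ops_caught is dead for the return value
def parseEquationNumsGo : List Char → List String → List Char → List String
  | [], nums, buff => nums ++ [String.ofList buff]
  | c :: cs, nums, buff =>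
      if pvIsOp c then parseEquationNumsGo cs (nums ++ [String.ofList buff]) []
      else parseEquationNumsGo cs nums (buff ++ [c])

def parseEquationNums (equationAsString : String) : List String :=
  parseEquationNumsGo equationAsString.toList [] []

-- ===== PORT B =====
-- re.split(r'[-+*/=]', s): built back-to-front by structural recursion on the characters
def pvReSplitOps : List Char → List String
  | [] => [""]
  | c :: cs =>
      if pvIsOp c then "" :: pvReSplitOps cs
      else
        match pvReSplitOps cs with
        | [] => [String.ofList [c]]      -- unreachable: the split is never empty
        | s :: rest => String.ofList (c :: s.toList) :: rest

def parseEquationNums_alt (equationAsString : String) : List String :=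
  pvReSplitOps equationAsString.toList

-- ===== PRECONDITION & SPEC =====
def Spec_parseEquationNums (equationAsString : String) (out : List String) : Prop := out = parseEquationNums_alt equationAsString
instance (equationAsString : String) (out : List String) : Decidable (Spec_parseEquationNums equationAsString out) := by unfold Spec_parseEquationNums; infer_instance

-- ===== CLAIM =====
def Claim_equal_parseEquationNums : Prop := ∀ (equationAsString : String), Dom_parseEquationNums equationAsString → Spec_parseEquationNums equationAsString (parseEquationNums equationAsString)

-- ===== LEMMAS AND PROOFS =====
theorem pvReSplitOps_ne_nil (cs : List Char) : pvReSplitOps cs ≠ [] := by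
  cases cs with
  | nil => simp [pvReSplitOps]
  | cons c cs =>
      simp only [pvReSplitOps]
      split
      · simp
      · cases h : pvReSplitOps cs <;> simp

theorem parseEquationNumsGo_eq (cs : List Char) :
    ∀ (nums : List String) (buff : List Char),
      parseEquationNumsGo cs nums buff =
        nums ++ (String.ofList (buff ++ (pvReSplitOps cs).headI.toList) :: (pvReSplitOps cs).tail) := by
  induction cs with
  | nil => intro nums buff; simp [parseEquationNumsGo, pvReSplitOps]
  | cons c cs ih =>
      intro nums buff
      simp only [parseEquationNumsGo, pvReSplitOps]
      by_cases h : pvIsOp c = true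
      · simp [h, ih, String.ofList_toList, List.headI_cons]
        cases hs : pvReSplitOps cs with
        | nil => exact absurd hs (pvReSplitOps_ne_nil cs)
        | cons a t => rfl
      · simp only [h, if_neg, Bool.false_eq_true, not_false_iff, ih]
        cases hs : pvReSplitOps cs with
        | nil => exact absurd hs (pvReSplitOps_ne_nil cs)
        | cons s rest => simp [String.toList_ofList]

-- ===== VERDICT =====
theorem parseEquationNums_spec : Claim_equal_parseEquationNums := by
  intro s _
  unfold Spec_parseEquationNums parseEquationNums parseEquationNums_alt
  rw [parseEquationNumsGo_eq]
  cases hs : pvReSplitOps s.toList with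
  | nil => exact absurd hs (pvReSplitOps_ne_nil _)
  | cons a rest => simp [String.ofList_toList]
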